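-- pv_equiv track=rewrite | github.com/Kuldeep120/test_projects | codility_test/questions/binary_gape.py | solution
-- ===== SOURCE A (Python) =====
-- def solution(N):
--     n_bin = "{:b}".format(N)
--     gape = -1
--     max_gape = 0
--     for i in n_bin:
--         if i == '1':
--             max_gape = max(gape, max_gape)
--             gape = 0
--         else:
--             gape += 1
--     return max_gape
-- ===== SOURCE B (Python) =====
-- def solution(N):
--     parts = "{:b}".format(N).split('1')
--     return max((len(g) for g in parts[1:-1]), default=0)
-- ===== Notes on version B (the rewrite author's own statement) =====
-- stated objective: simpler
-- what changed: Replaces the bit-by-bit loop with a running gap counter with a sentinel start value by splitting the binary string on '1' and taking the max length of the interior zero-runs.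
import Mathlib
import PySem

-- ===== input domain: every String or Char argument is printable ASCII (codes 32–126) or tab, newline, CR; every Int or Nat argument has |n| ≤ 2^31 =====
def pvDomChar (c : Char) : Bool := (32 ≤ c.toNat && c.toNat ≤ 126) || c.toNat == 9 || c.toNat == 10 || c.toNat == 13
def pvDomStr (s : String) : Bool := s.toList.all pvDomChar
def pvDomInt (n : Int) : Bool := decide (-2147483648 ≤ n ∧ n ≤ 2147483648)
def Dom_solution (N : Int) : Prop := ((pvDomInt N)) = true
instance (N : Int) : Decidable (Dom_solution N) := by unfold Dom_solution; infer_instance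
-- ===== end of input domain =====

-- B replaces A's char-by-char loop (running counter with a sentinel start) by splitting the
-- binary string on '1' and maximising the lengths of the interior zero-runs.

-- ===== PORT A =====
-- the for-loop of A over the characters of "{:b}".format(N), state = (gape, max_gape)
def solLoop : List Char → Int → Int → Int
  | [], _, maxGape => maxGape
  | c :: rest, gape, maxGape =>
    if c = '1' then solLoop rest 0 (max gape maxGape)
    else solLoop rest (gape + 1) maxGape

def solution (N : Int) : Int :=
  solLoop (PySem.Int.toBinChars N) (-1) 0

-- ===== PORT B =====
-- parts = "{:b}".format(N).split('1'); max((len(g) for g in parts[1:-1]), default=0)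
def solution_alt (N : Int) : Int :=
  let parts := PySem.Chars.splitOn (PySem.Int.toBinChars N) ['1']
  let inner := PySem.List.slice parts (some 1) (some (-1))
  match PySem.List.max? (inner.map (fun g => PySem.Chars.len g)) (fun x => x) with
  | some m => m
  | none => 0

-- ===== PRECONDITION & SPEC =====
def Spec_solution (N : Int) (out : Int) : Prop := out = solution_alt N
instance (N : Int) (out : Int) : Decidable (Spec_solution N out) := by unfold Spec_solution; infer_instance

-- ===== CLAIM (what is proved, stated in full; the proofs are below) =====
def Claim_equal_solution : Prop := ∀ (N : Int), Dom_solution N → Spec_solution N (solution N)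

-- ===== LEMMAS AND PROOFS =====

/-- Reference form of `s.split('1')` by plain structural recursion. -/
def splitOne : List Char → List (List Char)
  | [] => [[]]
  | c :: rest => if c = '1' then [] :: splitOne rest else (splitOne rest).modifyHead (c :: ·)

lemma splitOne_ne_nil (l : List Char) : splitOne l ≠ [] := by
  induction l with
  | nil => simp [splitOne]
  | cons c rest ih =>
    simp only [splitOne]
    split
    · simp
    · cases h : splitOne rest with
      | nil => exact absurd h ih
      | cons q t => simp

lemma go_spec : ∀ (fuel : Nat) (l cur acc : _), l.length < fuel →
    PySem.Chars.splitOn.go ['1'] fuel l cur acc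
      = acc.reverse ++ (splitOne l).modifyHead (cur.reverse ++ ·) := by
  intro fuel
  induction fuel with
  | zero => intro l cur acc h; omega
  | succ f ih =>
    intro l cur acc h
    cases l with
    | nil => simp [PySem.Chars.splitOn.go, splitOne]
    | cons c rest =>
      by_cases hc : c = '1'
      · subst hc
        rw [PySem.Chars.splitOn.go]
        simp only [List.isPrefixOf, BEq.rfl, Bool.true_and, if_pos]
        rw [ih _ _ _ (by simpa using Nat.lt_of_succ_lt_succ h)]
        cases hs : splitOne rest with
        | nil => exact absurd hs (splitOne_ne_nil rest)
        | cons q t => simp [splitOne, hs]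
      · rw [PySem.Chars.splitOn.go]
        have hpre : List.isPrefixOf ['1'] (c :: rest) = false := by
          simp [List.isPrefixOf]
          intro hh; exact absurd hh.symm hc
        rw [if_neg (by simp [hpre])]
        rw [ih _ _ _ (by simpa using Nat.lt_of_succ_lt_succ h)]
        cases hs : splitOne rest with
        | nil => simp [splitOne, hc, hs]
        | cons q t => simp [splitOne, hc, hs]

lemma splitOn_eq_splitOne (l : List Char) : PySem.Chars.splitOn l ['1'] = splitOne l := by
  unfold PySem.Chars.splitOn
  rw [go_spec _ _ _ _ (by omega)]
  cases h : splitOne l <;> simp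

/-- the reduction B performs over the interior zero-runs -/
def gapeFold (ps : List (List Char)) (init : Int) : Int :=
  ps.foldl (fun a q => max a (q.length : Int)) init

lemma key : ∀ (cs : List Char) (g m : Int),
    solLoop cs g m =
      match splitOne cs with
      | p :: q :: t => gapeFold ((q :: t).dropLast) (max (g + p.length) m)
      | _ => m := by
  intro cs
  induction cs with
  | nil => intro g m; simp [solLoop, splitOne]
  | cons c rest ih =>
    intro g m
    by_cases hc : c = '1'
    · subst hc
      have hL : solLoop ('1' :: rest) g m = solLoop rest 0 (max g m) := by simp [solLoop]
      have hS : splitOne ('1' :: rest) = [] :: splitOne rest := by simp [splitOne]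
      rw [hL, ih, hS]
      cases hs : splitOne rest with
      | nil => exact absurd hs (splitOne_ne_nil rest)
      | cons q t =>
        cases t with
        | nil => simp [gapeFold]
        | cons r t' =>
          show gapeFold ((r :: t').dropLast) (max (0 + (q.length : Int)) (max g m))
              = gapeFold ((q :: r :: t').dropLast) (max (g + (([] : List Char).length : Int)) m)
          simp only [gapeFold, List.dropLast_cons₂, List.foldl_cons]
          congr 1
          simp only [List.length_nil, Nat.cast_zero, add_zero, zero_add]
          omega
    · have hL : solLoop (c :: rest) g m = solLoop rest (g + 1) m := by simp [solLoop, hc]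
      have hS : splitOne (c :: rest) = (splitOne rest).modifyHead (c :: ·) := by
        simp [splitOne, hc]
      rw [hL, ih, hS]
      cases hs : splitOne rest with
      | nil => exact absurd hs (splitOne_ne_nil rest)
      | cons q t =>
        simp only [List.modifyHead_cons]
        cases t with
        | nil => rfl
        | cons r t' =>
          show gapeFold ((r :: t').dropLast) (max ((g + 1) + (q.length : Int)) m)
              = gapeFold ((r :: t').dropLast) (max (g + ((c :: q).length : Int)) m)
          congr 1
          simp only [List.length_cons]
          push_cast
          omega

lemma slice_one_negOne {α : Type} (l : List α) :
    PySem.List.slice l (some 1) (some (-1)) = l.tail.dropLast := by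
  cases l with
  | nil => simp [PySem.List.slice, PySem.List.clampIdx]
  | cons x xs =>
    simp only [PySem.List.slice, PySem.List.clampIdx]
    norm_num
    rw [if_neg (by omega), List.dropLast_eq_take]

lemma max?_getD_eq_gapeFold (ls : List (List Char)) :
    (match PySem.List.max? (ls.map (fun g => PySem.Chars.len g)) (fun x => x) with
     | some m => m | none => (0:Int)) = gapeFold ls 0 := by
  cases ls with
  | nil => simp [PySem.List.max?, gapeFold]
  | cons x xs =>
    rw [List.map_cons, PySem.List.max?_id_cons]
    simp only [gapeFold, List.foldl_cons, List.foldl_map, PySem.Chars.len]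
    rw [max_eq_right (Int.natCast_nonneg _)]

lemma toDigitsCore_two_head : ∀ (fuel n : Nat) (ds : List Char), 0 < n → n ≤ fuel →
    ∃ t, Nat.toDigitsCore 2 fuel n ds = '1' :: (t ++ ds) := by
  intro fuel
  induction fuel with
  | zero => intro n ds h1 h2; omega
  | succ f ih =>
    intro n ds h1 h2
    rw [Nat.toDigitsCore]
    by_cases h : n / 2 = 0
    · have hn : n = 1 := by omega
      subst hn
      refine ⟨[], ?_⟩
      norm_num
      decide
    · rw [if_neg h]
      obtain ⟨t, ht⟩ := ih (n / 2) ((n % 2).digitChar :: ds) (Nat.pos_of_ne_zero h) (by omega)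
      exact ⟨t ++ [(n % 2).digitChar], by simp [ht]⟩

lemma toDigits_two_pos (n : Nat) (h : 0 < n) : ∃ t, Nat.toDigits 2 n = '1' :: t := by
  obtain ⟨t, ht⟩ := toDigitsCore_two_head (n + 1) n [] h (by omega)
  exact ⟨t ++ [], by simpa [Nat.toDigits] using ht⟩

/-- shape of the split of a binary-formatted number: first segment has length ≤ 1 -/
lemma shape (N : Int) : ∃ p l, splitOne (PySem.Int.toBinChars N) = p :: l ∧ p.length ≤ 1 := by
  unfold PySem.Int.toBinChars
  by_cases hneg : N < 0
  · rw [if_pos hneg]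
    obtain ⟨t, ht⟩ := toDigits_two_pos N.natAbs (by omega)
    rw [ht]
    refine ⟨['-'], splitOne t, ?_, by simp⟩
    simp [splitOne]
  · rw [if_neg hneg]
    by_cases h0 : N = 0
    · subst h0
      exact ⟨['0'], [], by decide, by simp⟩
    · obtain ⟨t, ht⟩ := toDigits_two_pos N.toNat (by omega)
      rw [ht]
      exact ⟨[], splitOne t, by simp [splitOne], by simp⟩

lemma match_eq (p : List Char) (hp : max (-1 + (p.length : Int)) 0 = 0) (l : List (List Char)) :
    (match p :: l with
     | p :: q :: t => gapeFold ((q :: t).dropLast) (max (-1 + (p.length : Int)) 0)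
     | _ => (0:Int)) = gapeFold ((p :: l).tail.dropLast) 0 := by
  cases l with
  | nil => simp [gapeFold]
  | cons q t => simp [hp]

-- ===== VERDICT (by name: the statement is the Claim_ definition above) =====
theorem solution_spec : Claim_equal_solution := by
  intro N _
  unfold Spec_solution solution solution_alt
  simp only [splitOn_eq_splitOne, slice_one_negOne, max?_getD_eq_gapeFold]
  rw [key]
  obtain ⟨p, l, hpl, hlen⟩ := shape N
  rw [hpl]
  exact match_eq p (by omega) l
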